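-- pv_equiv track=rewrite | github.com/Ranj04/SusSweatShop-Automation | src/props_fetcher.py | format_props_summary
-- ===== SOURCE A (Python) =====
-- from typing import List, Dict, Optional
--
-- def format_props_summary(props: List[Dict]) -> str:
--     """
--     Format props into a readable summary
--
--     Args:
--         props: List of prop dictionaries
--
--     Returns:
--         Formatted string summary
--     """
--     if not props:
--         return "No props available for today."
--
--     # Group by sport
--     by_sport = {}
--     for prop in props:
--         sport = prop.get("sport", "Other")
--         if sport not in by_sport:
--             by_sport[sport] = []
--         by_sport[sport].append(prop)
--
--     lines = []
--     for sport, sport_props in by_sport.items():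
--         lines.append(f"\n{sport}:")
--         for prop in sport_props[:5]:  # Top 5 per sport
--             player = prop.get("player_name", "Unknown")
--             stat = prop.get("stat_type", "")
--             line = prop.get("line", "")
--             lines.append(f"  - {player}: {stat} {line}")
--
--     return "\n".join(lines)
-- ===== SOURCE B (Python) =====
-- def format_props_summary(props):
--     """Format props into a readable summary (index-of-sports + filtered scans; no grouping dict)."""
--     if not props:
--         return "No props available for today."
--     sports = []
--     for p in props:
--         s = p.get("sport", "Other")
--         if s not in sports:
--             sports.append(s)
--     return "\n".join(
--         f"\n{sport}:" + "".join(
--             f"\n  - {p.get('player_name', 'Unknown')}: {p.get('stat_type', '')} {p.get('line', '')}"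
--             for p in [q for q in props if q.get("sport", "Other") == sport][:5]
--         )
--         for sport in sports
--     )
-- ===== Notes on version B (the rewrite author's own statement) =====
-- stated objective: alternative
-- what changed: Replaced A's grouping dictionary (sport -> list of props, then a two-level loop over its items) by a first-seen ordered list of distinct sports plus a filtered re-scan of props per sport, emitting each sport's block as one string.
import Mathlib
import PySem

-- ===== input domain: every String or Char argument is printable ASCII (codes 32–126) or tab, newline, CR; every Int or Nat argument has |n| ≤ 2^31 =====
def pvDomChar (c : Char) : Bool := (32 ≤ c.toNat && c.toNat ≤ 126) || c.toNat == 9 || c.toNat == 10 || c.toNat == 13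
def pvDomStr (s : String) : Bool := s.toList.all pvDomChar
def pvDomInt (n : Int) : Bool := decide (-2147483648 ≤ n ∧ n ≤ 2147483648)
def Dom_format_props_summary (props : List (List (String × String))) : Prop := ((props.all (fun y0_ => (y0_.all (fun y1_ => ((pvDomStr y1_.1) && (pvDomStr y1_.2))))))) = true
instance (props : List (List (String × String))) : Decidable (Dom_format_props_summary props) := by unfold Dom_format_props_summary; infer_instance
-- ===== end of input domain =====

-- B replaces A's grouping dict by a first-seen ordered list of sports plus a filtered
-- re-scan of props per sport (objective: alternative decomposition, similar cost).


-- ===== PORT A =====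
-- prop.get(k, dflt) on a prop dict (modelled as an association list)
def pvGet (p : List (String × String)) (k dflt : String) : String :=
  (PySem.Dict.mk p).getD k dflt

-- f"  - {player}: {stat} {line}"
def pvLineA (prop : List (String × String)) : String :=
  "  - " ++ pvGet prop "player_name" "Unknown" ++ ": " ++ pvGet prop "stat_type" "" ++ " " ++ pvGet prop "line" ""

def format_props_summary (props : List (List (String × String))) : String :=
  if props = [] then "No props available for today."
  else
    -- by_sport = {}; for prop in props: setdefault-style grouping
    let bySport : PySem.Dict String (List (List (String × String))) :=
      props.foldl (fun d prop =>
        let sport := pvGet prop "sport" "Other"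
        let d := if d.contains sport then d else d.insert sport []
        d.insert sport (d.getD sport [] ++ [prop])) PySem.Dict.empty
    -- lines = []; for sport, sport_props in by_sport.items(): …
    let lines : List String :=
      bySport.items.foldl (fun lines sp =>
        let lines := lines ++ ["\n" ++ sp.1 ++ ":"]
        (sp.2.take 5).foldl (fun lines prop => lines ++ [pvLineA prop]) lines) []
    PySem.Str.join "\n" lines

-- ===== PORT B =====
-- f"\n  - {player}: {stat} {line}"
def pvLineB (prop : List (String × String)) : String :=
  "\n  - " ++ pvGet prop "player_name" "Unknown" ++ ": " ++ pvGet prop "stat_type" "" ++ " " ++ pvGet prop "line" ""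

def format_props_summary_alt (props : List (List (String × String))) : String :=
  if props = [] then "No props available for today."
  else
    -- sports = []; for p in props: append p.get("sport","Other") if unseen
    let sports : PySem.Set String :=
      props.foldl (fun acc p => PySem.Set.add acc (pvGet p "sport" "Other")) []
    PySem.Str.join "\n" (sports.map (fun sport =>
      "\n" ++ sport ++ ":" ++
        PySem.Str.join "" (((props.filter (fun q => pvGet q "sport" "Other" == sport)).take 5).map pvLineB)))

-- ===== PRECONDITION & SPEC =====
def Spec_format_props_summary (props : List (List (String × String))) (out : String) : Prop := out = format_props_summary_alt props
instance (props : List (List (String × String))) (out : String) : Decidable (Spec_format_props_summary props out) := by unfold Spec_format_props_summary; infer_instance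

-- ===== CLAIM (what is proved, stated in full; the proofs are below) =====
def Claim_equal_format_props_summary : Prop := ∀ (props : List (List (String × String))), Dom_format_props_summary props → Spec_format_props_summary props (format_props_summary props)

-- ===== LEMMAS AND PROOFS =====

-- .get("sport","Other"), shorthand for the proofs
def pvSport (p : List (String × String)) : String := pvGet p "sport" "Other"

-- A's grouping step is Dict.modify
lemma pv_step_eq_modify (d : PySem.Dict String (List (List (String × String))))
    (prop : List (String × String)) :
    (let sport := pvGet prop "sport" "Other"
     let d' := if d.contains sport then d else d.insert sport []
     d'.insert sport (d'.getD sport [] ++ [prop]))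
    = d.modify (pvSport prop) [] (· ++ [prop]) := by
  show (let sport := pvSport prop
        let d' := if d.contains sport then d else d.insert sport []
        d'.insert sport (d'.getD sport [] ++ [prop])) = _
  by_cases h : d.contains (pvSport prop)
  · simp [h, PySem.Dict.modify]
  · have h' : d.contains (pvSport prop) = false := by simpa using h
    simp [h', PySem.Dict.modify, PySem.Dict.getD_insert_self,
      PySem.Dict.insert_insert_self, PySem.Dict.getD_of_not_contains (h := h')]

-- join sep (x :: rest) unfolded to a flatMap
lemma pv_join_cons (sep x : List Char) (rest : List (List Char)) :
    PySem.Chars.join sep (x :: rest) = x ++ rest.flatMap (fun l => sep ++ l) := by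
  induction rest generalizing x with
  | nil => simp [PySem.Chars.join_singleton]
  | cons b u ih => rw [PySem.Chars.join_cons_cons, ih]; simp

-- join with empty separator is flatten
lemma pv_join_nil_sep (xs : List (List Char)) : PySem.Chars.join [] xs = xs.flatten := by
  induction xs with
  | nil => rfl
  | cons a t ih => cases t with
    | nil => simp [PySem.Chars.join_singleton]
    | cons b u => rw [PySem.Chars.join_cons_cons]; simp_all

-- the grouped-lines join equals the per-block join
lemma pv_join_blocks (sep : List Char) (groups : List (List Char × List (List Char))) :
    PySem.Chars.join sep (groups.flatMap fun g => g.1 :: g.2)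
      = PySem.Chars.join sep (groups.map fun g => g.1 ++ g.2.flatMap (fun l => sep ++ l)) := by
  cases groups with
  | nil => rfl
  | cons g t =>
    rw [List.flatMap_cons, List.map_cons, List.cons_append, pv_join_cons, pv_join_cons]
    simp [List.flatMap_append, List.flatMap_assoc, List.flatMap_map]

lemma pv_lineB_toList (p : List (String × String)) :
    (pvLineB p).toList = '\n' :: (pvLineA p).toList := by
  simp [pvLineA, pvLineB]

def pvHead (k : String) : List Char := ("\n" ++ k ++ ":").toList

def pvTail (props : List (List (String × String))) (k : String) : List (List Char) :=
  ((props.filter (fun p => pvSport p == k)).take 5).map (fun p => (pvLineA p).toList)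

lemma pv_blockB_toList (props : List (List (String × String))) (k : String) :
    ("\n" ++ k ++ ":" ++ PySem.Str.join ""
        (((props.filter (fun q => pvGet q "sport" "Other" == k)).take 5).map pvLineB)).toList
    = pvHead k ++ (pvTail props k).flatMap (fun l => ['\n'] ++ l) := by
  simp only [pvHead, pvTail, pvSport, String.toList_append, PySem.Str.join, String.toList_ofList]
  rw [show (("" : String).toList) = ([] : List Char) from by decide, pv_join_nil_sep]
  simp [List.map_map, Function.comp_def, pv_lineB_toList, List.flatMap,
    List.append_assoc]

-- ===== VERDICT (by name: the statement is the Claim_ definition above) =====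
theorem format_props_summary_spec : Claim_equal_format_props_summary := by
  unfold Claim_equal_format_props_summary
  intro props _
  unfold Spec_format_props_summary
  by_cases h : props = []
  · simp [format_props_summary, format_props_summary_alt, h]
  · simp only [format_props_summary, format_props_summary_alt, if_neg h]
    -- normalize A's grouping dict
    have hstep : props.foldl (fun d prop =>
        let sport := pvGet prop "sport" "Other"
        let d' := if d.contains sport then d else d.insert sport []
        d'.insert sport (d'.getD sport [] ++ [prop]))
        (PySem.Dict.empty : PySem.Dict String (List (List (String × String))))
        = props.foldl (fun d p => d.modify (pvSport p) [] (· ++ [p])) PySem.Dict.empty :=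
      PySem.List.foldl_congr_mem _ _ _ _ (fun acc p _ => pv_step_eq_modify acc p)
    rw [hstep]
    set D := props.foldl (fun d p => d.modify (pvSport p) [] (· ++ [p])) PySem.Dict.empty with hD
    have hnodup : D.keys.Nodup := by
      exact PySem.Dict.nodup_keys_foldl_modify_key props pvSport [] (fun _ p => (· ++ [p]))
        PySem.Dict.empty (by simp [PySem.Dict.keys_empty])
    have hkeys : D.keys = PySem.Set.ofList (props.map pvSport) := by
      rw [hD, PySem.Dict.keys_foldl_modify_key props pvSport [] (fun _ p => (· ++ [p]))]
      rw [PySem.Dict.keys_empty, PySem.Set.update_nil_left]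
    have hgetD : ∀ s, D.getD s [] = props.filter (fun p => pvSport p == s) := by
      intro s
      have hm : List.foldl (fun (d : PySem.Dict String (List (List (String × String)))) p =>
            d.modify (pvSport p) [] (· ++ [p])) PySem.Dict.empty props
          = List.foldl (fun d q => d.modify q.1 [] (· ++ [q.2])) PySem.Dict.empty
              (props.map (fun p => (pvSport p, p))) := by
        rw [List.foldl_map]
      show (List.foldl (fun d p => d.modify (pvSport p) [] (· ++ [p])) PySem.Dict.empty props).getD s [] = _
      rw [hm, PySem.Dict.getD_foldl_modify_append]
      simp [List.filter_map, Function.comp_def, List.map_map, PySem.Dict.getD_empty]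
    have hitems : D.items = D.keys.map (fun k => (k, D.getD k [])) :=
      PySem.Dict.items_eq_map_keys D hnodup []
    -- normalize A's line-building loops
    have hlines : D.items.foldl (fun lines sp =>
        let lines' := lines ++ ["\n" ++ sp.1 ++ ":"]
        (sp.2.take 5).foldl (fun lines prop => lines ++ [pvLineA prop]) lines') []
        = D.items.flatMap (fun sp => ("\n" ++ sp.1 ++ ":") :: (sp.2.take 5).map pvLineA) := by
      have : ∀ (its : List (String × List (List (String × String)))) (acc : List String),
          its.foldl (fun lines sp =>
            let lines' := lines ++ ["\n" ++ sp.1 ++ ":"]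
            (sp.2.take 5).foldl (fun lines prop => lines ++ [pvLineA prop]) lines') acc
          = acc ++ its.flatMap (fun sp => ("\n" ++ sp.1 ++ ":") :: (sp.2.take 5).map pvLineA) := by
        intro its
        induction its with
        | nil => simp
        | cons sp t ih =>
          intro acc
          simp only [List.foldl_cons, List.flatMap_cons,
            PySem.List.foldl_append_singleton_eq_map]
          simp [List.flatMap]
      simpa using this D.items []
    rw [hlines, hitems, hkeys]
    -- normalize B's sports list
    have hsports : props.foldl (fun acc p => PySem.Set.add acc (pvGet p "sport" "Other")) []
        = PySem.Set.ofList (props.map pvSport) := by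
      rw [PySem.Set.ofList_eq_foldl, List.foldl_map]
      rfl
    rw [hsports]
    set K := PySem.Set.ofList (props.map pvSport) with hK
    -- both sides are joins over the same groups; compare at the character level
    apply congrArg String.ofList
    have hA : List.map String.toList
        (List.flatMap (fun sp => ("\n" ++ sp.1 ++ ":") :: List.map pvLineA (List.take 5 sp.2))
          (List.map (fun k => (k, D.getD k [])) K))
        = K.flatMap (fun k => pvHead k :: pvTail props k) := by
      rw [List.flatMap_map, List.map_flatMap]
      simp only [hgetD]
      simp [pvHead, pvTail, Function.comp_def]
    have hBmap : List.map String.toList (List.map (fun sport =>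
          "\n" ++ sport ++ ":" ++ PySem.Str.join ""
            (((props.filter (fun q => pvGet q "sport" "Other" == sport)).take 5).map pvLineB)) K)
        = K.map (fun k => pvHead k ++ (pvTail props k).flatMap (fun l => ['\n'] ++ l)) := by
      rw [List.map_map]
      simp only [Function.comp_def]
      exact List.map_congr_left (fun k _ => pv_blockB_toList props k)
    rw [hA, hBmap, show ("\n" : String).toList = ['\n'] from by decide]
    have hJB := pv_join_blocks ['\n'] (K.map fun k => (pvHead k, pvTail props k))
    simp only [List.flatMap_map, List.map_map, Function.comp_def] at hJB
    exact hJB
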